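-- pv_equiv track=rewrite | github.com/pisterlabs/promptset | data/scraping-2.0/repos/Monash-FIT3170~Team4-Android-Talkback/scripts~languages.py | _sort_in_same_order
-- ===== SOURCE A (Python) =====
-- TranslationDict = dict[str, str]
--
-- def _sort_in_same_order(translation_dict: TranslationDict, reference_dict: TranslationDict) -> TranslationDict:
--     """Sorts 'translation_dict's keys in same order as 'reference_dict'.
--
--     Note that 'translation_dict' does not need to have the exact same set of
--     keys as 'reference_dict':
--         - Any key in 'reference_dict' that is not in 'translation_dict' is
--           ignored.
--         - Any keys in 'translation_dict that are not in 'reference_dict' are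
--           placed in their original relative ordering but at the *end* of the
--           returned dict.
--     """
--     new_d = {}
--     for key in reference_dict.keys():
--         if key in translation_dict:
--             new_d[key] = translation_dict[key]
--
--     # Add any missing keys, i.e. keys in translation_dict that were not in
--     # reference_dict for some reason. Shouldn't really happen
--     for key in translation_dict.keys():
--         # E.g. if 'reference_dict' did not have this key for some reason
--         if key not in new_d:
--             new_d[key] = translation_dict[key]
--
--     return new_d
-- ===== SOURCE B (Python) =====
-- TranslationDict = dict[str, str]
--
-- def _sort_in_same_order(translation_dict: TranslationDict, reference_dict: TranslationDict) -> TranslationDict: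
--     """Index-then-sort: give every key a numeric rank (its position in
--     reference_dict, or len(reference)+its own position for keys missing from
--     reference, so missing keys land at the end in their original order) and
--     sort the keys by that rank."""
--     index = {k: i for i, k in enumerate(reference_dict)}
--     n = len(index)
--     rank = {k: index.get(k, n + j) for j, k in enumerate(translation_dict)}
--     ordered = sorted(translation_dict, key=rank.__getitem__)
--     return {k: translation_dict[k] for k in ordered}
-- ===== Notes on version B (the rewrite author's own statement) =====
-- stated objective: alternative
-- what changed: Replaces A's two filtered scans with membership tests by an index-then-sort strategy: build a numeric rank for every key (position in reference_dict, or len(reference)+own position for keys absent from it) and sort the translation keys by that rank.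
import Mathlib
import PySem

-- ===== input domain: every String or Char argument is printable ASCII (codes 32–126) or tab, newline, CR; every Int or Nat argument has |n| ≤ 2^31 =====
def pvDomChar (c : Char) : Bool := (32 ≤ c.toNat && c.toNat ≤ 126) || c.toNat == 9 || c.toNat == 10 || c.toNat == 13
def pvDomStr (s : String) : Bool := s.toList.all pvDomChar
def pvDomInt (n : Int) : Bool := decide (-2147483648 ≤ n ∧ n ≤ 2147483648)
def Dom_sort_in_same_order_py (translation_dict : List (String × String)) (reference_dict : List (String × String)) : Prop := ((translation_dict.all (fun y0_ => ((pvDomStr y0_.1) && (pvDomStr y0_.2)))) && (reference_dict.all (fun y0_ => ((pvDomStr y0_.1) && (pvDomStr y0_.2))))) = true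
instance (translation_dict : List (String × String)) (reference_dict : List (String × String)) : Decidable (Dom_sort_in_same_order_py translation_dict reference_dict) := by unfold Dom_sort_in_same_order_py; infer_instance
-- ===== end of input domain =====

-- B replaces A's two filtered scans by an index-then-sort strategy (rank every key, sort by rank); equal return value proved on dict inputs (distinct keys).

-- ===== PORT A =====
def sort_in_same_order_py (translation_dict : List (String × String)) (reference_dict : List (String × String)) : List (String × String) :=
  let td := PySem.Dict.mk translation_dict
  let rd := PySem.Dict.mk reference_dict
  let new_d :=
    rd.keys.foldl (fun d key =>
      if td.contains key then
        -- translation_dict[key]: 'key in translation_dict' holds here, so getD's default is never used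
        d.insert key (td.getD key "")
      else d) PySem.Dict.empty
  let new_d2 :=
    td.keys.foldl (fun d key =>
      if d.contains key then d
      else d.insert key (td.getD key "")) new_d
  new_d2.items

-- ===== PORT B =====
def sort_in_same_order_py_alt (translation_dict : List (String × String)) (reference_dict : List (String × String)) : List (String × String) :=
  let td := PySem.Dict.mk translation_dict
  let rd := PySem.Dict.mk reference_dict
  let index := (PySem.List.enumerate rd.keys).foldl
      (fun d p => d.insert p.2 p.1) PySem.Dict.empty
  let n : Int := index.size
  let rank := (PySem.List.enumerate td.keys).foldl
      (fun d p => d.insert p.2 (index.getD p.2 (n + p.1))) PySem.Dict.empty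
  -- rank.__getitem__: every sorted key is a translation key, hence a key of rank, so getD's default is never used
  let ordered := PySem.List.sorted td.keys (fun k => rank.getD k 0)
  (ordered.foldl (fun d k => d.insert k (td.getD k "")) PySem.Dict.empty).items

-- ===== PRECONDITION & SPEC =====
-- Python dict arguments cannot carry duplicate keys; an association list with a repeated key
-- does not represent any dict input, so Pre_ requires the keys of each list to be distinct.
def Pre_sort_in_same_order_py (translation_dict : List (String × String)) (reference_dict : List (String × String)) : Prop :=
  (translation_dict.map Prod.fst).Nodup ∧ (reference_dict.map Prod.fst).Nodup
instance (translation_dict : List (String × String)) (reference_dict : List (String × String)) : Decidable (Pre_sort_in_same_order_py translation_dict reference_dict) := by unfold Pre_sort_in_same_order_py; infer_instance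

def pvWitness_sort_in_same_order_py : (List (String × String)) × (List (String × String)) :=
  ([("a", "1"), ("c", "3"), ("b", "2")], [("b", "x"), ("a", "y")])

def Spec_sort_in_same_order_py (translation_dict : List (String × String)) (reference_dict : List (String × String)) (out : List (String × String)) : Prop := out = sort_in_same_order_py_alt translation_dict reference_dict
instance (translation_dict : List (String × String)) (reference_dict : List (String × String)) (out : List (String × String)) : Decidable (Spec_sort_in_same_order_py translation_dict reference_dict out) := by unfold Spec_sort_in_same_order_py; infer_instance

-- ===== CLAIM (what is proved, stated in full; the proofs are below) =====
def Claim_equal_sort_in_same_order_py : Prop := ∀ (translation_dict : List (String × String)) (reference_dict : List (String × String)), Dom_sort_in_same_order_py translation_dict reference_dict → Pre_sort_in_same_order_py translation_dict reference_dict → Spec_sort_in_same_order_py translation_dict reference_dict (sort_in_same_order_py translation_dict reference_dict)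

-- ===== LEMMAS AND PROOFS =====

-- The common target: keys of the reference present in the translation (in reference order),
-- then the remaining translation keys (in translation order).
def pvKeyOrder (tk rk : List String) : List String :=
  rk.filter (fun k => decide (k ∈ tk)) ++ tk.filter (fun k => decide (k ∉ rk))

-- A's first loop: over distinct keys fresh for the accumulator, it appends the matching items.
lemma pv_loopA1 (td : PySem.Dict String String) :
    ∀ (ks : List String) (d : PySem.Dict String String), ks.Nodup →
    (∀ k ∈ ks, d.contains k = false) →
    (ks.foldl (fun d key => if td.contains key then d.insert key (td.getD key "") else d) d).items
      = d.items ++ (ks.filter (fun k => td.contains k)).map (fun k => (k, td.getD k ""))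
  | [], d, _, _ => by simp
  | k :: ks, d, hnd, hfresh => by
    have hk := hfresh k (by simp)
    have hnd' := hnd.of_cons
    have hne : ∀ k' ∈ ks, k' ≠ k := fun k' h' => fun he => (List.nodup_cons.mp hnd).1 (he ▸ h')
    simp only [List.foldl_cons, List.filter_cons]
    by_cases hc : td.contains k = true
    · rw [if_pos hc, if_pos hc,
        pv_loopA1 td ks _ hnd' (fun k' h' => by
          rw [PySem.Dict.contains_insert]
          simp [hne k' h', hfresh k' (by simp [h'])]),
        PySem.Dict.items_insert_of_not_contains _ _ hk]
      simp
    · rw [if_neg hc, if_neg (by simp [hc]),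
        pv_loopA1 td ks d hnd' (fun k' h' => hfresh k' (by simp [h']))]

-- A's second loop: appends the items whose key the accumulator does not yet contain.
lemma pv_loopA2 (td : PySem.Dict String String) :
    ∀ (ks : List String) (d : PySem.Dict String String), ks.Nodup →
    (ks.foldl (fun d key => if d.contains key then d else d.insert key (td.getD key "")) d).items
      = d.items ++ (ks.filter (fun k => !(d.contains k))).map (fun k => (k, td.getD k ""))
  | [], d, _ => by simp
  | k :: ks, d, hnd => by
    have hnd' := hnd.of_cons
    have hne : ∀ k' ∈ ks, k' ≠ k := fun k' h' => fun he => (List.nodup_cons.mp hnd).1 (he ▸ h')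
    simp only [List.foldl_cons, List.filter_cons]
    by_cases hc : d.contains k = true
    · rw [if_pos hc, pv_loopA2 td ks d hnd']
      simp [hc]
    · rw [if_neg hc, pv_loopA2 td ks _ hnd',
        PySem.Dict.items_insert_of_not_contains _ _ (by simpa using hc),
        List.filter_congr (l := ks)
          (q := fun k' => !(d.contains k'))
          (fun k' h' => by rw [PySem.Dict.contains_insert]; simp [hne k' h'])]
      simp [hc]

-- positions are strictly increasing along a duplicate-free list
lemma pv_pairwise_idxOf (l : List String) (h : l.Nodup) :
    l.Pairwise (fun a b => l.idxOf a < l.idxOf b) := by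
  rw [List.pairwise_iff_getElem]
  intro i j hi hj hij
  rw [List.Nodup.idxOf_getElem h i hi, List.Nodup.idxOf_getElem h j hj]
  exact hij

-- A returns exactly the items of pvKeyOrder
lemma pv_A_eq (translation_dict reference_dict : List (String × String))
    (ht : (translation_dict.map (fun x => x.1)).Nodup)
    (hr : (reference_dict.map (fun x => x.1)).Nodup) :
    sort_in_same_order_py translation_dict reference_dict
      = (pvKeyOrder (translation_dict.map (fun x => x.1)) (reference_dict.map (fun x => x.1))).map
          (fun k => (k, (PySem.Dict.mk translation_dict).getD k "")) := by
  unfold sort_in_same_order_py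
  simp only [PySem.Dict.keys_mk]
  set td := PySem.Dict.mk translation_dict with htd
  set tk := translation_dict.map (fun x => x.1) with htk
  set rk := reference_dict.map (fun x => x.1) with hrk
  have hkeys_td : td.keys = tk := by rw [htd]; exact PySem.Dict.keys_mk _
  have hcont_td : ∀ k, td.contains k = decide (k ∈ tk) := fun k => by
    rw [PySem.Dict.contains_eq_decide_mem_keys, hkeys_td]
  set d1 := rk.foldl (fun d key => if td.contains key then d.insert key (td.getD key "") else d) PySem.Dict.empty with hd1
  have hd1items : d1.items = (rk.filter (fun k => td.contains k)).map (fun k => (k, td.getD k "")) := by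
    rw [hd1, pv_loopA1 td rk PySem.Dict.empty hr (by simp)]
    rw [show (PySem.Dict.empty : PySem.Dict String String).items = [] from rfl, List.nil_append]
  have hd1keys : d1.keys = rk.filter (fun k => td.contains k) := by
    simp only [PySem.Dict.keys, hd1items, List.map_map]
    exact List.map_id' _
  rw [pv_loopA2 td tk d1 ht]
  rw [hd1items, pvKeyOrder, List.map_append]
  congr 1
  · congr 1
    exact List.filter_congr (fun k _ => hcont_td k)
  · congr 1
    refine List.filter_congr (fun k hk => ?_)
    rw [PySem.Dict.contains_eq_decide_mem_keys, hd1keys]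
    have hmem : k ∈ rk.filter (fun k => td.contains k) ↔ k ∈ rk := by
      rw [List.mem_filter]
      constructor
      · exact fun h => h.1
      · exact fun h => ⟨h, by rw [hcont_td]; simpa using hk⟩
    by_cases hkr : k ∈ rk <;> simp [hmem, hkr]

-- B returns exactly the items of pvKeyOrder
lemma pv_B_eq (translation_dict reference_dict : List (String × String))
    (ht : (translation_dict.map (fun x => x.1)).Nodup)
    (hr : (reference_dict.map (fun x => x.1)).Nodup) :
    sort_in_same_order_py_alt translation_dict reference_dict
      = (pvKeyOrder (translation_dict.map (fun x => x.1)) (reference_dict.map (fun x => x.1))).map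
          (fun k => (k, (PySem.Dict.mk translation_dict).getD k "")) := by
  unfold sort_in_same_order_py_alt
  simp only [PySem.Dict.keys_mk]
  set td := PySem.Dict.mk translation_dict with htd
  set tk := translation_dict.map (fun x => x.1) with htk
  set rk := reference_dict.map (fun x => x.1) with hrk
  -- the index dict: key ↦ its position in rk
  set index := (PySem.List.enumerate rk).foldl (fun d p => d.insert p.2 p.1) PySem.Dict.empty with hidx
  have hidx_items : index.items = (PySem.List.enumerate rk).map (fun p => (p.2, p.1)) := by
    rw [hidx, PySem.Dict.items_foldl_insert_fresh _ _ _ _ (by simp)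
      (by rw [PySem.List.map_snd_enumerate]; exact hr)]
    rw [show (PySem.Dict.empty : PySem.Dict String Int).items = [] from rfl, List.nil_append]
  have hidx_keys : index.keys = rk := by
    simp only [PySem.Dict.keys, hidx_items, List.map_map]
    have he : ((fun x : String × Int => x.1) ∘ fun p : Int × String => (p.2, p.1))
        = (fun p : Int × String => p.2) := rfl
    rw [he, PySem.List.map_snd_enumerate]
  have hidx_size : (index.size : Int) = (rk.length : Int) := by
    simp only [PySem.Dict.size, hidx_items]
    simp [PySem.List.length_enumerate]
  have hidx_get : ∀ k ∈ rk, index.get? k = some ((rk.idxOf k : Nat) : Int) := by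
    intro k hk
    refine PySem.Dict.get?_of_mem_items index ?_ (by rw [hidx_keys]; exact hr)
    rw [hidx_items, List.mem_map]
    refine ⟨(((rk.idxOf k : Nat) : Int), k), ?_, rfl⟩
    rw [PySem.List.mem_enumerate_iff]
    exact ⟨rk.idxOf k, List.idxOf_lt_length_of_mem hk,
      by simp [List.getElem_idxOf (List.idxOf_lt_length_of_mem hk)]⟩
  have hidx_cont : ∀ k, index.contains k = decide (k ∈ rk) := fun k => by
    rw [PySem.Dict.contains_eq_decide_mem_keys, hidx_keys]
  -- the rank dict
  set n : Int := (index.size : Int) with hn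
  set rank := (PySem.List.enumerate tk).foldl
      (fun d p => d.insert p.2 (index.getD p.2 (n + p.1))) PySem.Dict.empty with hrankd
  have hrank_items : rank.items
      = (PySem.List.enumerate tk).map (fun p => (p.2, index.getD p.2 (n + p.1))) := by
    rw [hrankd, PySem.Dict.items_foldl_insert_fresh _ _ _ _ (by simp)
      (by rw [PySem.List.map_snd_enumerate]; exact ht)]
    rw [show (PySem.Dict.empty : PySem.Dict String Int).items = [] from rfl, List.nil_append]
  have hrank_keys : rank.keys = tk := by
    simp only [PySem.Dict.keys, hrank_items, List.map_map]
    have he : ((fun x : String × Int => x.1)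
        ∘ fun p : Int × String => (p.2, index.getD p.2 (n + p.1)))
        = (fun p : Int × String => p.2) := rfl
    rw [he, PySem.List.map_snd_enumerate]
  have hrank : ∀ k ∈ tk, rank.getD k 0
      = if k ∈ rk then ((rk.idxOf k : Nat) : Int) else (rk.length : Int) + (tk.idxOf k : Nat) := by
    intro k hk
    have hmem : (k, index.getD k (n + ((tk.idxOf k : Nat) : Int))) ∈ rank.items := by
      rw [hrank_items, List.mem_map]
      refine ⟨(((tk.idxOf k : Nat) : Int), k), ?_, rfl⟩
      rw [PySem.List.mem_enumerate_iff]
      exact ⟨tk.idxOf k, List.idxOf_lt_length_of_mem hk,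
        by simp [List.getElem_idxOf (List.idxOf_lt_length_of_mem hk)]⟩
    rw [PySem.Dict.getD_of_mem_items rank hmem (by rw [hrank_keys]; exact ht) 0]
    by_cases hkr : k ∈ rk
    · rw [PySem.Dict.getD_of_get?_eq_some index _ (hidx_get k hkr)]
      simp [hkr]
    · rw [PySem.Dict.getD_of_not_contains index (n + ((tk.idxOf k : Nat) : Int))
        (show index.contains k = false by rw [hidx_cont k]; simp [hkr])]
      rw [hidx_size]
      simp [hkr]
  -- the sort produces exactly pvKeyOrder
  have hperm : (pvKeyOrder tk rk).Perm tk := by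
    unfold pvKeyOrder
    have h1 : (rk.filter (fun k => decide (k ∈ tk))).Perm (tk.filter (fun k => decide (k ∈ rk))) := by
      apply (List.perm_ext_iff_of_nodup (hr.filter _) (ht.filter _)).mpr
      intro a
      simp only [List.mem_filter, decide_eq_true_eq]
      exact ⟨fun h => ⟨h.2, h.1⟩, fun h => ⟨h.2, h.1⟩⟩
    refine (h1.append_right _).trans ?_
    have h2 := List.filter_append_perm (fun k => decide (k ∈ rk)) tk
    refine List.Perm.trans ?_ h2
    apply List.Perm.append_left
    apply List.Perm.of_eq
    apply List.filter_congr
    intro a _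
    simp
  have hpair : (pvKeyOrder tk rk).Pairwise
      (fun a b => rank.getD a 0 < rank.getD b 0) := by
    unfold pvKeyOrder
    rw [List.pairwise_append]
    refine ⟨?_, ?_, ?_⟩
    · have hp : (rk.filter (fun k => decide (k ∈ tk))).Pairwise
          (fun a b => rk.idxOf a < rk.idxOf b) :=
        (pv_pairwise_idxOf rk hr).sublist List.filter_sublist
      refine hp.imp_of_mem ?_
      intro a b ha hb hlt
      have ha' := List.mem_filter.mp ha
      have hb' := List.mem_filter.mp hb
      rw [hrank a (by simpa using ha'.2), hrank b (by simpa using hb'.2),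
        if_pos ha'.1, if_pos hb'.1]
      exact_mod_cast hlt
    · have hp : (tk.filter (fun k => decide (k ∉ rk))).Pairwise
          (fun a b => tk.idxOf a < tk.idxOf b) :=
        (pv_pairwise_idxOf tk ht).sublist List.filter_sublist
      refine hp.imp_of_mem ?_
      intro a b ha hb hlt
      have ha' := List.mem_filter.mp ha
      have hb' := List.mem_filter.mp hb
      rw [hrank a ha'.1, hrank b hb'.1,
        if_neg (by simpa using ha'.2), if_neg (by simpa using hb'.2)]
      omega
    · intro a ha b hb
      have ha' := List.mem_filter.mp ha
      have hb' := List.mem_filter.mp hb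
      rw [hrank a (by simpa using ha'.2), hrank b hb'.1,
        if_pos ha'.1, if_neg (by simpa using hb'.2)]
      have hlt : rk.idxOf a < rk.length := List.idxOf_lt_length_of_mem ha'.1
      omega
  rw [PySem.List.sorted_eq_of_perm_of_pairwise_lt tk (pvKeyOrder tk rk) _ hperm hpair]
  -- the final rebuild loop over the distinct keys appends each item
  have hnodup_ys : (pvKeyOrder tk rk).Nodup := by
    unfold pvKeyOrder
    refine (hr.filter _).append (ht.filter _) ?_
    intro a ha hb
    have ha' := List.mem_filter.mp ha
    have hb' := List.mem_filter.mp hb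
    exact absurd ha'.1 (by simpa using hb'.2)
  rw [PySem.Dict.items_foldl_insert_fresh (pvKeyOrder tk rk) (fun a => a)
      (fun a => td.getD a "") PySem.Dict.empty (by simp) (by simpa using hnodup_ys)]
  rw [show (PySem.Dict.empty : PySem.Dict String String).items = [] from rfl, List.nil_append]

-- ===== VERDICT (by name: the statement is the Claim_ definition above) =====
theorem sort_in_same_order_py_spec : Claim_equal_sort_in_same_order_py := by
  intro translation_dict reference_dict _ hpre
  unfold Spec_sort_in_same_order_py
  rw [pv_A_eq _ _ hpre.1 hpre.2, pv_B_eq _ _ hpre.1 hpre.2]
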